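-- pv_equiv track=rewrite | github.com/osmany-perez-1998/grammar-analyzer | src/grammar_analyzer/regular_analyzer.py | gnfa_to_regex
-- ===== SOURCE A (Python) =====
-- def gnfa_to_regex(states: list, transitions: dict) -> str:
--     if len(states) == 2:
--         return transitions[states[0], states[-1]]
--
--     # remove state
--     qrip = states.pop(1)
--     for qi in states[:-1]:
--         for qj in states[1:]:
--             r1, r2, r3, r4 = (
--                 transitions[qi, qrip],
--                 transitions[qrip, qrip],
--                 transitions[qrip, qj],
--                 transitions[qi, qj],
--             )
--             transitions[qi, qj] = f"(({r1})({r2})*({r3}))|({r4})"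
--
--     return gnfa_to_regex(states, transitions)
-- ===== SOURCE B (Python) =====
-- def gnfa_to_regex(states: list, transitions: dict) -> str:
--     # Iterative state elimination over a precomputed rip list; does not mutate `states`
--     # (A pops from it in place); mutates `transitions` like A.
--     first, last = states[0], states[-1]
--     rips = states[1:-1]
--     while rips:
--         qrip = rips.pop(0)
--         keep = [first] + rips + [last]
--         for qi in keep[:-1]:
--             for qj in keep[1:]:
--                 r1, r2, r3, r4 = (
--                     transitions[qi, qrip],
--                     transitions[qrip, qrip],
--                     transitions[qrip, qj],
--                     transitions[qi, qj],
--                 )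
--                 transitions[qi, qj] = f"(({r1})({r2})*({r3}))|({r4})"
--     return transitions[first, last]
-- ===== Notes on version B (the rewrite author's own statement) =====
-- stated objective: alternative
-- what changed: Replaces the tail recursion that pops from `states` in place with an iterative loop over a precomputed rip list states[1:-1], with first/last fixed up front and the kept-state list rebuilt per round; `states` is no longer mutated (return value unchanged).
import Mathlib
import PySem

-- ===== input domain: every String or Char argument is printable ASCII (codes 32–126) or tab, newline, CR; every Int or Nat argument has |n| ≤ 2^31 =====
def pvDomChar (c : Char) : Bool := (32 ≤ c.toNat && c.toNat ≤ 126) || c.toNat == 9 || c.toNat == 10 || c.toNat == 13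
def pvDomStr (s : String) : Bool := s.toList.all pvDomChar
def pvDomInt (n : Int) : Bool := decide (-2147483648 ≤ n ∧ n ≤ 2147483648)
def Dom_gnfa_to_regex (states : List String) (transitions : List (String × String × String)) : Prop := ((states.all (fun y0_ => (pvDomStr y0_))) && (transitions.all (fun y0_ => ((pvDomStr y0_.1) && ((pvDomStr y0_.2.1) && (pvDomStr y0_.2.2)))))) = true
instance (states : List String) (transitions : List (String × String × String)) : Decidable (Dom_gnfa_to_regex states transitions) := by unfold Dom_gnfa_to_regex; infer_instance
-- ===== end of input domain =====

-- B changes the decomposition: an iterative pass over the precomputed rip list instead of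
-- A's tail recursion popping from `states`.  Return value only: Python A pops `states` in
-- place, Python B does not (both mutate `transitions` identically).

-- ===== PORT A =====
-- dict[(str,str), str] lookup (first match; none ⇒ KeyError, excluded by Pre_; "" is a
-- stand-in outside Pre_) and assignment (overwrite in place, else append) — exact Python
-- dict semantics on the flattened triple representation.
def tget (t : List (String × String × String)) (a b : String) : String :=
  match t with
  | [] => ""
  | (x, y, r) :: rest => if x == a && y == b then r else tget rest a b

def tset (t : List (String × String × String)) (a b v : String) : List (String × String × String) :=
  match t with
  | [] => [(a, b, v)]
  | (x, y, r) :: rest => if x == a && y == b then (x, y, v) :: rest else (x, y, r) :: tset rest a b v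

-- literal port of A: recursion, popping states[1]
def gnfa_to_regex (states : List String) (transitions : List (String × String × String)) : String :=
  if states.length = 2 then
    tget transitions (states.headD "") (states.getLastD "")
  else
    match states with
    | q0 :: qrip :: rest =>
      let ss := q0 :: rest
      let t' := ss.dropLast.foldl (fun t qi =>
        (ss.drop 1).foldl (fun t qj =>
          tset t qi qj ("((" ++ tget t qi qrip ++ ")(" ++ tget t qrip qrip ++ ")*(" ++ tget t qrip qj ++ "))|(" ++ tget t qi qj ++ ")")) t) transitions
      gnfa_to_regex ss t'
    | _ => ""   -- Python raises IndexError here (len(states) < 2); outside Pre_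
  termination_by states.length
  decreasing_by simp [*]

-- ===== PORT B =====
-- the while loop of Source B: one round per remaining rip state
def altLoop (first lastS : String) (rips : List String) (t : List (String × String × String)) : List (String × String × String) :=
  match rips with
  | [] => t
  | qrip :: rips' =>
    let keep := first :: rips' ++ [lastS]
    altLoop first lastS rips'
      (keep.dropLast.foldl (fun t qi =>
        (keep.drop 1).foldl (fun t qj =>
          tset t qi qj ("((" ++ tget t qi qrip ++ ")(" ++ tget t qrip qrip ++ ")*(" ++ tget t qrip qj ++ "))|(" ++ tget t qi qj ++ ")")) t) t)

def gnfa_to_regex_alt (states : List String) (transitions : List (String × String × String)) : String :=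
  let first := states.headD ""        -- states[0]   (IndexError on [], outside Pre_)
  let lastS := states.getLastD ""     -- states[-1]
  let rips := (states.drop 1).dropLast  -- states[1:-1]
  tget (altLoop first lastS rips transitions) first lastS

-- ===== PRECONDITION & SPEC =====
-- Pre_ excludes exactly the inputs on which A raises: states lists of length < 2
-- (IndexError) and transition tables missing a key in states[:-1] × states[1:], the
-- set of keys A reads (KeyError).
def Pre_gnfa_to_regex (states : List String) (transitions : List (String × String × String)) : Prop :=
  2 ≤ states.length ∧ ∀ a ∈ states.dropLast, ∀ b ∈ states.drop 1, ∃ e ∈ transitions, e.1 = a ∧ e.2.1 = b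
instance (states : List String) (transitions : List (String × String × String)) : Decidable (Pre_gnfa_to_regex states transitions) := by unfold Pre_gnfa_to_regex; infer_instance

def pvWitness_gnfa_to_regex : List String × (List (String × String × String)) :=
  (["a", "b"], [("a", "a", "0"), ("a", "b", "1"), ("b", "a", ""), ("b", "b", "0|1")])

def Spec_gnfa_to_regex (states : List String) (transitions : List (String × String × String)) (out : String) : Prop := out = gnfa_to_regex_alt states transitions
instance (states : List String) (transitions : List (String × String × String)) (out : String) : Decidable (Spec_gnfa_to_regex states transitions out) := by unfold Spec_gnfa_to_regex; infer_instance

-- ===== CLAIM (what is proved, stated in full; the proofs are below) =====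
def Claim_equal_gnfa_to_regex : Prop := ∀ (states : List String) (transitions : List (String × String × String)), Dom_gnfa_to_regex states transitions → Pre_gnfa_to_regex states transitions → Spec_gnfa_to_regex states transitions (gnfa_to_regex states transitions)

-- ===== LEMMAS AND PROOFS =====

-- core invariant: A on the list  first :: rips ++ [last]  computes exactly B's loop result
theorem gnfa_key (first lastS : String) : ∀ (rips : List String) (t : List (String × String × String)),
    gnfa_to_regex (first :: rips ++ [lastS]) t = tget (altLoop first lastS rips t) first lastS := by
  intro rips
  induction rips with
  | nil =>
    intro t
    rw [gnfa_to_regex.eq_def]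
    simp [altLoop]
  | cons q rest ih =>
    intro t
    rw [gnfa_to_regex.eq_def, altLoop]
    simp only [List.cons_append]
    rw [if_neg (by simp)]
    exact ih _

-- any list of length ≥ 2 decomposes as head :: middle ++ [last]
theorem gnfa_decomp_aux (x d : String) : ∀ (l : List String),
    x :: l = (x :: l).dropLast ++ [(x :: l).getLastD d] := by
  intro l
  induction l generalizing x with
  | nil => simp
  | cons y ys ih => simpa using ih y

theorem gnfa_decomp (states : List String) (h : 2 ≤ states.length) :
    states = states.headD "" :: ((states.drop 1).dropLast ++ [states.getLastD ""]) := by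
  match states, h with
  | a :: b :: l, _ =>
    cases hx : (b :: l).getLast? with
    | none => simp at hx
    | some x =>
      have h1 := gnfa_decomp_aux b a l
      simp only [List.getLastD_eq_getLast?, hx, Option.getD_some] at h1
      simp only [List.headD_cons, List.drop_succ_cons, List.drop_zero,
        List.getLastD_eq_getLast?, List.getLast?_cons_cons, hx, Option.getD_some,
        List.cons.injEq, true_and]
      exact h1

-- ===== VERDICT (by name: the statement is the Claim_ definition above) =====
theorem gnfa_to_regex_spec : Claim_equal_gnfa_to_regex := by
  intro states transitions _ hpre
  unfold Spec_gnfa_to_regex gnfa_to_regex_alt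
  have hdec := gnfa_decomp states hpre.1
  conv_lhs => rw [hdec]
  exact gnfa_key _ _ _ _
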